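-- pv_equiv track=rewrite | github.com/FabienMnsn/PROGRES_miniProjet3 | Xml_file_transcoding.py | split_char_code
-- ===== SOURCE A (Python) =====
-- def split_char_code(string):
--     """
--     fonction qui split une chaine de caracteres en une liste de carateres.
--     le critere de split est de la forme &auml; (c'est un code iso pour représenter les caracteres spéciaux)
--     """
--     res = []
--     start_index = 0
--     end_index = 0
--     for i in range(len(string)):
--         if(string[i] == "&"):
--             end_index = i-1
--             res.append(string[start_index:end_index+1])
--             start_index = i
--         if(string[i] == ';'):
--             end_index = i+1
--             res.append(string[start_index:end_index])
--             start_index = i+1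
--         else:
--             end_index = i
--     res.append(string[start_index:end_index+1])
--     return res
-- ===== SOURCE B (Python) =====
-- def split_char_code(string):
--     # Right-to-left scan: walk the string backwards keeping the chars of the
--     # current (not yet closed) segment; '&' closes the segment it starts,
--     # ';' closes the segment ending right after it and opens one with ';'.
--     segs = []
--     cur = []  # chars of the current segment, collected in reverse order
--     for c in reversed(string):
--         if c == '&':
--             cur.append('&')
--             segs.append(''.join(reversed(cur)))
--             cur = []
--         elif c == ';':
--             segs.append(''.join(reversed(cur)))
--             cur = [';']
--         else:
--             cur.append(c)
--     segs.append(''.join(reversed(cur)))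
--     segs.reverse()
--     return segs
-- ===== Notes on version B (the rewrite author's own statement) =====
-- stated objective: alternative
-- what changed: A scans left-to-right maintaining start_index/end_index and slicing the string; B scans the string right-to-left with a current-segment character accumulator ('&' closes the segment it starts, ';' closes the segment ending after it), collecting segments back-to-front and reversing once at the end.
import Mathlib
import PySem

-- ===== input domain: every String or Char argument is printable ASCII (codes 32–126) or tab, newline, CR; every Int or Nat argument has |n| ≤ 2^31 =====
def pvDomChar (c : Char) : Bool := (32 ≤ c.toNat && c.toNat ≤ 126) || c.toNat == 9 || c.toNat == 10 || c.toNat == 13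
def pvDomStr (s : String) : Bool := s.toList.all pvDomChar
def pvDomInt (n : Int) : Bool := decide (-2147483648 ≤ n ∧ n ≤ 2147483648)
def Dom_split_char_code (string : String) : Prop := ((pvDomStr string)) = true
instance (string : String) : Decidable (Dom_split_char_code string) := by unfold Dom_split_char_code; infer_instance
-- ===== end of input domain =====

-- B replaces A's left-to-right index bookkeeping (start_index/end_index plus string
-- slicing) by a right-to-left scan with a current-segment character accumulator,
-- collecting segments back-to-front (objective: alternative decomposition, same O(n)).

-- ===== PORT A =====
-- one step of A's loop body: state = (res, start_index, end_index), input = (i, string[i])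
def pvStepA (cs : List Char) (acc : List String × Int × Int) (p : Int × Char) :
    List String × Int × Int :=
  let res := acc.1
  let start := acc.2.1
  -- if string[i] == '&': end_index = i-1; res.append(string[start:end_index+1]); start = i
  let rs :=
    if p.2 = '&' then
      (res ++ [String.ofList (PySem.List.slice cs (some start) (some ((p.1 - 1) + 1)))], p.1)
    else (res, start)
  -- if string[i] == ';': end_index = i+1; res.append(string[start:end_index]); start = i+1
  if p.2 = ';' then
    (rs.1 ++ [String.ofList (PySem.List.slice cs (some rs.2) (some (p.1 + 1)))], p.1 + 1, p.1 + 1)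
  else -- else: end_index = i
    (rs.1, rs.2, p.1)

def split_char_code (string : String) : List String :=
  let cs := string.toList
  let st := (PySem.List.enumerate cs 0).foldl (pvStepA cs) ([], 0, 0)
  st.1 ++ [String.ofList (PySem.List.slice cs (some st.2.1) (some (st.2.2 + 1)))]

-- ===== PORT B =====
-- one step of B's backward loop: state = (segs, cur) with cur the chars of the
-- current segment collected in reverse order
def pvStepB (st : List String × List Char) (c : Char) : List String × List Char :=
  if c = '&' then (st.1 ++ [String.ofList (st.2 ++ ['&']).reverse], [])
  else if c = ';' then (st.1 ++ [String.ofList st.2.reverse], [';'])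
  else (st.1, st.2 ++ [c])

def split_char_code_alt (string : String) : List String :=
  let st := string.toList.reverse.foldl pvStepB ([], [])
  (st.1 ++ [String.ofList st.2.reverse]).reverse

-- ===== PRECONDITION & SPEC =====
def Spec_split_char_code (string : String) (out : List String) : Prop := out = split_char_code_alt string
instance (string : String) (out : List String) : Decidable (Spec_split_char_code string out) := by unfold Spec_split_char_code; infer_instance

-- ===== CLAIM (what is proved, stated in full; the proofs are below) =====
def Claim_equal_split_char_code : Prop := ∀ (string : String), Dom_split_char_code string → Spec_split_char_code string (split_char_code string)

-- ===== LEMMAS AND PROOFS =====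

-- reference segmentation, recursive on the string: '&' opens the segment it heads,
-- ';' closes a segment ending right after it
def pvSpec : List Char → List (List Char)
  | [] => [[]]
  | c :: t =>
    let r := pvSpec t
    if c = '&' then [] :: ('&' :: r.headD []) :: r.tail
    else if c = ';' then [';'] :: r
    else (c :: r.headD []) :: r.tail

theorem pvSpec_ne_nil (cs : List Char) : pvSpec cs ≠ [] := by
  cases cs with
  | nil => simp [pvSpec]
  | cons c t => simp only [pvSpec]; split_ifs <;> simp

-- B's backward fold computes pvSpec's head (reversed) and tail
theorem pvB_state (cs : List Char) :
    ((cs.foldr (fun c st => pvStepB st c) (([] : List String), ([] : List Char))).2.reverse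
        = (pvSpec cs).headD [])
    ∧ ((cs.foldr (fun c st => pvStepB st c) (([] : List String), ([] : List Char))).1.reverse
        = (pvSpec cs).tail.map String.ofList) := by
  induction cs with
  | nil => simp [pvSpec]
  | cons c t ih =>
    obtain ⟨h2, h1⟩ := ih
    obtain ⟨h, tl, hps⟩ := List.exists_cons_of_ne_nil (pvSpec_ne_nil t)
    rw [hps] at h2 h1
    simp only [List.headD_cons, List.tail_cons] at h2 h1
    simp only [List.foldr_cons]
    set st := List.foldr (fun c st => pvStepB st c) (([] : List String), ([] : List Char)) t
      with hst
    by_cases hamp : c = '&'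
    · simp [pvStepB, hamp, pvSpec, h2, h1, hps]
    · by_cases hsc : c = ';'
      · simp [pvStepB, hsc, pvSpec, h2, h1, hps]
      · simp [pvStepB, hamp, hsc, pvSpec, h2, h1, hps]

theorem pvB_eq (s : String) :
    split_char_code_alt s = (pvSpec s.toList).map String.ofList := by
  unfold split_char_code_alt
  obtain ⟨h2, h1⟩ := pvB_state s.toList
  obtain ⟨h, tl, hps⟩ := List.exists_cons_of_ne_nil (pvSpec_ne_nil s.toList)
  rw [hps] at h2 h1 ⊢
  simp only [List.headD_cons, List.tail_cons] at h2 h1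
  rw [List.foldl_reverse]
  simp [h2, h1]

-- slicing one more character: string[start:j+1] = string[start:j] + [string[j]]
theorem pv_slice_snoc (cs : List Char) (j start : ℕ) (c : Char) (t : List Char)
    (h : cs.drop j = c :: t) (hs : start ≤ j) :
    PySem.List.slice cs (some (start : Int)) (some ((j : Int) + 1))
      = PySem.List.slice cs (some (start : Int)) (some (j : Int)) ++ [c] := by
  have hj1 : ((j : Int) + 1) = ((j + 1 : ℕ) : Int) := by push_cast; ring
  rw [hj1, PySem.List.slice_natCast, PySem.List.slice_natCast]
  have hn : j + 1 - start = (j - start) + 1 := by omega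
  rw [hn, List.take_add_one]
  congr 1
  have hget : cs[j]? = some c := by
    have := congrArg (fun l => l[0]?) h
    simpa using this
  have hgd : (cs.drop start)[j - start]? = cs[start + (j - start)]? := List.getElem?_drop
  rw [hgd]
  have hidx : start + (j - start) = j := by omega
  rw [hidx, hget]
  rfl

-- the loop invariant for A: processing the suffix l (starting at index j) appends the
-- pvSpec segments of l, the first one glued onto the currently open slice
theorem pvA_inv (cs : List Char) (l : List Char) :
    ∀ (j : ℕ) (res : List String) (start endi : Int),
      cs.drop j = l → 0 ≤ start → start ≤ (j : Int) → (j : Int) - 1 ≤ endi →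
      ((PySem.List.enumerate l (j : Int)).foldl (pvStepA cs) (res, start, endi)).1
          ++ [String.ofList (PySem.List.slice cs
                (some ((PySem.List.enumerate l (j : Int)).foldl (pvStepA cs) (res, start, endi)).2.1)
                (some (((PySem.List.enumerate l (j : Int)).foldl (pvStepA cs) (res, start, endi)).2.2 + 1)))]
        = res ++ String.ofList (PySem.List.slice cs (some start) (some (j : Int)) ++ (pvSpec l).headD [])
            :: ((pvSpec l).tail.map String.ofList) := by
  induction l with
  | nil =>
    intro j res start endi hdrop hs0 hsj hej
    have hlen : cs.length ≤ j := List.drop_eq_nil_iff.1 hdrop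
    simp only [PySem.List.enumerate_nil, List.foldl_nil, pvSpec, List.headD, List.tail,
      List.map_nil, List.append_nil]
    have h1 : PySem.List.slice cs (some start) (some (endi + 1))
        = PySem.List.slice cs (some start) (some (j : Int)) := by
      rw [PySem.List.slice_toNat cs hs0 (by omega), PySem.List.slice_toNat cs hs0 (by omega)]
      rw [List.take_of_length_le, List.take_of_length_le] <;> (rw [List.length_drop]; omega)
    rw [h1]
  | cons c t ih =>
    intro j res start endi hdrop hs0 hsj hej
    have hdrop' : cs.drop (j + 1) = t := by
      have := congrArg (fun l => l.drop 1) hdrop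
      simpa [List.drop_drop, Nat.add_comm] using this
    have hcast : (j : Int) + 1 = ((j + 1 : ℕ) : Int) := by push_cast; ring
    rw [PySem.List.enumerate_cons]
    simp only [List.foldl_cons]
    obtain ⟨h, tl, hps⟩ := List.exists_cons_of_ne_nil (pvSpec_ne_nil t)
    by_cases hamp : c = '&'
    · have hstep : pvStepA cs (res, start, endi) ((j : Int), c)
          = (res ++ [String.ofList (PySem.List.slice cs (some start) (some (((j : Int) - 1) + 1)))],
             (j : Int), (j : Int)) := by
        simp [pvStepA, hamp]
      have harith : ((j : Int) - 1) + 1 = (j : Int) := by ring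
      rw [hstep, harith, hcast]
      rw [ih (j + 1) _ (j : Int) (j : Int) hdrop' (by positivity) (by push_cast; omega)
          (by push_cast; omega)]
      have hseg : PySem.List.slice cs (some (j : Int)) (some ((j + 1 : ℕ) : Int)) = [c] := by
        rw [← hcast, pv_slice_snoc cs j j c t hdrop (le_refl j)]
        rw [PySem.List.slice_natCast]
        simp
      rw [hseg]
      simp [pvSpec, hamp, hps]
    · by_cases hsc : c = ';'
      · have hstep : pvStepA cs (res, start, endi) ((j : Int), c)
            = (res ++ [String.ofList (PySem.List.slice cs (some start) (some ((j : Int) + 1)))],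
               (j : Int) + 1, (j : Int) + 1) := by
          simp [pvStepA, hsc]
        rw [hstep, hcast]
        rw [ih (j + 1) _ ((j + 1 : ℕ) : Int) ((j + 1 : ℕ) : Int) hdrop' (by positivity)
            (le_refl _) (by push_cast; omega)]
        have hempty : PySem.List.slice cs (some ((j + 1 : ℕ) : Int)) (some ((j + 1 : ℕ) : Int))
            = [] := by
          rw [PySem.List.slice_natCast]; simp
        rw [hempty]
        have hst : ((start.toNat : ℕ) : Int) = start := by omega
        have hsnoc := pv_slice_snoc cs j start.toNat c t hdrop (by omega)
        rw [hst] at hsnoc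
        rw [← hcast, hsnoc]
        simp [pvSpec, hsc, hps]
      · have hstep : pvStepA cs (res, start, endi) ((j : Int), c) = (res, start, (j : Int)) := by
          simp [pvStepA, hamp, hsc]
        rw [hstep, hcast]
        rw [ih (j + 1) res start (j : Int) hdrop' hs0 (by push_cast; omega) (by push_cast; omega)]
        have hst : ((start.toNat : ℕ) : Int) = start := by omega
        have hsnoc := pv_slice_snoc cs j start.toNat c t hdrop (by omega)
        rw [hst] at hsnoc
        rw [← hcast, hsnoc]
        simp [pvSpec, hamp, hsc, hps]

theorem pvA_eq (s : String) :
    split_char_code s = (pvSpec s.toList).map String.ofList := by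
  unfold split_char_code
  have h := pvA_inv s.toList s.toList 0 [] 0 0 (by simp) (le_refl 0) (by simp) (by simp)
  simp only [Nat.cast_zero] at h
  rw [h]
  obtain ⟨hd, tl, hps⟩ := List.exists_cons_of_ne_nil (pvSpec_ne_nil s.toList)
  have hempty : PySem.List.slice s.toList (some (0 : Int)) (some (0 : Int)) = [] := by
    have : ((0 : ℕ) : Int) = (0 : Int) := rfl
    rw [← this, PySem.List.slice_natCast]; simp
  rw [hps, hempty]
  simp

-- ===== VERDICT (by name: the statement is the Claim_ definition above) =====
theorem split_char_code_spec : Claim_equal_split_char_code := by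
  intro s _
  unfold Spec_split_char_code
  rw [pvA_eq, pvB_eq]
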